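-- pv_equiv track=rewrite | github.com/alessandropotenza/motion-planning-proj | 2Dexamples/eval_ee_goal_rrtstar.py | build_checkpoints
-- ===== SOURCE A (Python) =====
-- from typing import Any, Dict, List, Optional, Tuple
--
-- def build_checkpoints(start_iter: int, max_iters: int) -> List[int]:
--     if start_iter <= 0:
--         raise ValueError("log_start_iter must be > 0")
--     if max_iters < 1:
--         raise ValueError("max_iters must be >= 1")
--
--     checkpoints: List[int] = []
--     current = int(start_iter)
--     while current < max_iters:
--         checkpoints.append(current)
--         current *= 2
--     checkpoints.append(max_iters)
--     return sorted(set(checkpoints))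
-- ===== SOURCE B (Python) =====
-- from typing import List
--
-- def build_checkpoints(start_iter: int, max_iters: int) -> List[int]:
--     if start_iter <= 0:
--         raise ValueError("log_start_iter must be > 0")
--     if max_iters < 1:
--         raise ValueError("max_iters must be >= 1")
--     q = -(-max_iters // start_iter)                # ceil(max_iters / start_iter)
--     n = 0 if q <= 1 else (q - 1).bit_length()      # smallest n with start_iter * 2**n >= max_iters
--     return [start_iter * 2 ** k for k in range(n)] + [max_iters]
-- ===== Notes on version B (the rewrite author's own statement) =====
-- stated objective: alternative
-- what changed: Replaces the doubling while-loop plus sorted(set(...)) by a closed-form step count from a ceiling division and bit_length, then builds the (provably strictly increasing) list directly with one map over range, skipping the redundant dedup-and-sort.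
import Mathlib
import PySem

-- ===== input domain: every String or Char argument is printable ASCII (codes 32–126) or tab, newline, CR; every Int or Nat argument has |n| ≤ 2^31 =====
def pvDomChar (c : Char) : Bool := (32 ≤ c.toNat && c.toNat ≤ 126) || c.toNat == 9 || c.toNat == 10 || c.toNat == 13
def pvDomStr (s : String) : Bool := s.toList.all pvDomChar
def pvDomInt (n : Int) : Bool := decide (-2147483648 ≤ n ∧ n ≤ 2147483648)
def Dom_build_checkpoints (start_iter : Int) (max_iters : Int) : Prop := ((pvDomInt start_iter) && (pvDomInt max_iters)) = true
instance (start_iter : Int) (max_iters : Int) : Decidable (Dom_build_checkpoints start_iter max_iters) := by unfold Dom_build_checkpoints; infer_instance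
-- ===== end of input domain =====

-- B replaces A's iterate-and-accumulate doubling loop (plus the redundant sorted(set(...)))
-- by a closed-form step count from a ceiling division and bit_length, then one map over range.

-- ===== PORT A =====
-- while current < max_iters: checkpoints.append(current); current *= 2
-- (the '0 < current' conjunct is a totality guard only: with current ≤ 0 Python's loop never terminates,
--  and such inputs are excluded by Pre_ anyway since A raises on start_iter ≤ 0)
def bcLoop (max_iters : Int) (current : Int) (checkpoints : List Int) : List Int :=
  if _h : 0 < current ∧ current < max_iters then
    bcLoop max_iters (current * 2) (checkpoints ++ [current])
  else checkpoints
termination_by (max_iters - current).toNat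
decreasing_by omega

def build_checkpoints (start_iter : Int) (max_iters : Int) : List Int :=
  -- guards: A raises on start_iter ≤ 0 or max_iters < 1; those inputs are outside Pre_
  let checkpoints := bcLoop max_iters start_iter []
  let checkpoints := checkpoints ++ [max_iters]     -- checkpoints.append(max_iters)
  PySem.List.sorted (PySem.Set.ofList checkpoints) (fun x => x) false   -- sorted(set(checkpoints))

-- ===== PORT B =====
def build_checkpoints_alt (start_iter : Int) (max_iters : Int) : List Int :=
  let q := -(PySem.Int.floordiv (-max_iters) start_iter)          -- ceil(max_iters / start_iter)
  let n : Nat := if q ≤ 1 then 0 else PySem.Int.bitLength (q - 1) -- smallest n with start_iter*2^n ≥ max_iters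
  (List.range n).map (fun k => start_iter * 2 ^ k) ++ [max_iters]

-- ===== PRECONDITION & SPEC =====
-- Pre_ excludes exactly the inputs on which A raises ValueError (start_iter ≤ 0 or max_iters < 1).
def Pre_build_checkpoints (start_iter : Int) (max_iters : Int) : Prop :=
  0 < start_iter ∧ 1 ≤ max_iters
instance (start_iter : Int) (max_iters : Int) : Decidable (Pre_build_checkpoints start_iter max_iters) := by
  unfold Pre_build_checkpoints; infer_instance
def pvWitness_build_checkpoints : Int × Int := (3, 100)

def Spec_build_checkpoints (start_iter : Int) (max_iters : Int) (out : List Int) : Prop := out = build_checkpoints_alt start_iter max_iters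
instance (start_iter : Int) (max_iters : Int) (out : List Int) : Decidable (Spec_build_checkpoints start_iter max_iters out) := by unfold Spec_build_checkpoints; infer_instance

-- ===== CLAIM (what is proved, stated in full; the proofs are below) =====
def Claim_equal_build_checkpoints : Prop := ∀ (start_iter : Int) (max_iters : Int), Dom_build_checkpoints start_iter max_iters → Pre_build_checkpoints start_iter max_iters → Spec_build_checkpoints start_iter max_iters (build_checkpoints start_iter max_iters)

-- ===== LEMMAS AND PROOFS =====

-- The loop unrolled: with n the least exponent closing the loop, bcLoop emits the geometric list.
theorem bcLoop_eq (m : Int) (n : Nat) :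
    ∀ (c : Int) (acc : List Int), 0 < c → m ≤ c * 2 ^ n → (∀ k < n, c * 2 ^ k < m) →
    bcLoop m c acc = acc ++ (List.range n).map (fun k => c * 2 ^ k) := by
  induction n with
  | zero =>
    intro c acc hc hub _
    rw [bcLoop]
    simp only [pow_zero, mul_one] at hub
    simp [not_lt.mpr hub]
  | succ n ih =>
    intro c acc hc hub hlb
    have hcm : c < m := by have := hlb 0 (Nat.succ_pos n); simpa using this
    rw [bcLoop]
    simp only [hc, hcm, and_self, dite_true]
    rw [ih (c * 2) (acc ++ [c]) (by positivity)
        (by rw [mul_assoc, ← pow_succ']; exact hub)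
        (by intro k hk
            have := hlb (k + 1) (Nat.succ_lt_succ hk)
            rw [mul_assoc, ← pow_succ']; exact this)]
    rw [List.range_succ_eq_map]
    simp only [List.map_cons, List.map_map, pow_zero, mul_one, List.append_assoc,
      List.singleton_append]
    congr 2
    apply List.map_congr_left
    intro k _
    simp only [Function.comp_apply, Nat.succ_eq_add_one]
    ring

-- The geometric list followed by max_iters is strictly increasing.
theorem geom_pairwise (c m : Int) (n : Nat) (hc : 0 < c) (hlb : ∀ k < n, c * 2 ^ k < m) :
    ((List.range n).map (fun k => c * 2 ^ k) ++ [m]).Pairwise (· < ·) := by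
  rw [List.pairwise_append]
  refine ⟨?_, by simp, ?_⟩
  · refine List.Pairwise.map _ ?_ List.pairwise_lt_range
    intro a b hab
    exact mul_lt_mul_of_pos_left (pow_lt_pow_right₀ (by norm_num) hab) hc
  · intro a ha b hb
    simp only [List.mem_singleton] at hb
    subst hb
    simp only [List.mem_map, List.mem_range] at ha
    obtain ⟨k, hk, rfl⟩ := ha
    exact hlb k hk

theorem build_checkpoints_eq (s m : Int) (hs : 0 < s) (hm : 1 ≤ m) :
    build_checkpoints s m = build_checkpoints_alt s m := by
  unfold build_checkpoints build_checkpoints_alt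
  set q := -(PySem.Int.floordiv (-m) s) with hq
  have hbr : (q - 1) * s < m ∧ m ≤ q * s :=
    (PySem.Int.neg_floordiv_neg_eq_iff_of_pos hs).mp hq.symm
  have hq1 : 1 ≤ q := by
    nlinarith [hbr.2]
  set n : Nat := if q ≤ 1 then 0 else PySem.Int.bitLength (q - 1) with hn
  -- upper bound: m ≤ s * 2 ^ n
  have hub : m ≤ s * 2 ^ n := by
    by_cases h1 : q ≤ 1
    · have : q = 1 := le_antisymm h1 hq1
      simp only [hn, h1, if_true, pow_zero, mul_one]
      nlinarith [hbr.2]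
    · have hq2 : 2 ≤ q := by omega
      have hlt := PySem.Int.lt_two_pow_bitLength (q - 1)
      have hcast : ((q - 1).natAbs : Int) = q - 1 := Int.natAbs_of_nonneg (by omega)
      have h2 : q - 1 < (2 : Int) ^ PySem.Int.bitLength (q - 1) := by
        calc q - 1 = ((q - 1).natAbs : Int) := hcast.symm
          _ < ((2 ^ PySem.Int.bitLength (q - 1) : Nat) : Int) := by exact_mod_cast hlt
          _ = (2 : Int) ^ PySem.Int.bitLength (q - 1) := by push_cast; ring
      simp only [hn, h1, if_false]
      nlinarith [hbr.2, h2]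
  -- lower bound: every earlier power is below m
  have hlb : ∀ k < n, s * 2 ^ k < m := by
    intro k hk
    have h1 : ¬ q ≤ 1 := by
      by_contra h
      simp [hn, h] at hk
    have hq2 : 2 ≤ q := by omega
    simp only [hn, h1, if_false] at hk
    have hne : q - 1 ≠ 0 := by omega
    have hle := PySem.Int.two_pow_bitLength_le (q - 1) hne
    have hcast : ((q - 1).natAbs : Int) = q - 1 := Int.natAbs_of_nonneg (by omega)
    have h2 : (2 : Int) ^ (PySem.Int.bitLength (q - 1) - 1) ≤ q - 1 := by
      calc (2 : Int) ^ (PySem.Int.bitLength (q - 1) - 1)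
          = ((2 ^ (PySem.Int.bitLength (q - 1) - 1) : Nat) : Int) := by push_cast; ring
        _ ≤ ((q - 1).natAbs : Int) := by exact_mod_cast hle
        _ = q - 1 := hcast
    have hkle : k ≤ PySem.Int.bitLength (q - 1) - 1 := by omega
    have h3 : (2 : Int) ^ k ≤ 2 ^ (PySem.Int.bitLength (q - 1) - 1) :=
      pow_le_pow_right₀ (by norm_num) hkle
    nlinarith [hbr.1]
  have hloop := bcLoop_eq m n s [] hs hub hlb
  rw [hloop]
  simp only [List.nil_append]
  set L := (List.range n).map (fun k => s * 2 ^ k) ++ [m] with hL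
  have hpw : L.Pairwise (· < ·) := geom_pairwise s m n hs hlb
  rw [PySem.Set.ofList_eq_self_of_nodup L (hpw.imp ne_of_lt)]
  exact PySem.List.sorted_eq_of_perm_of_pairwise_lt L L (fun x => x) (List.Perm.refl L) hpw

-- ===== VERDICT (by name: the statement is the Claim_ definition above) =====
theorem build_checkpoints_spec : Claim_equal_build_checkpoints := by
  intro s m _ hpre
  unfold Spec_build_checkpoints
  exact build_checkpoints_eq s m hpre.1 hpre.2
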